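-- pv_equiv track=rewrite | github.com/collinsakenga/codewars_solutions | 6 kyu/Take a Number And Sum Its Digits Raised To The Consecutive Powers And Eureka.py | sum_dig_pow
-- ===== SOURCE A (Python) =====
-- def sum_dig_pow(a, b): # range(a, b + 1) will be studied by the function
--     temp=[0, 1, 2, 3, 4, 5, 6, 7, 8, 9, 89, 135, 175, 518, 598, 1306, 1676, 2427, 2646798, 12157692622039623539]
--     res=[]
--     for i in range(a,b+1):
--         for j in temp:
--             if i==j:
--                 res.append(j)
--     return res
-- ===== SOURCE B (Python) =====
-- def sum_dig_pow(a, b):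
--     # Single-digit numbers 0..9 are all eureka (d**1 == d), so that part of the
--     # answer is just the arithmetic intersection of [a, b] with [0, 9]; the only
--     # other eureka numbers are ten known multi-digit constants (OEIS A032799),
--     # which are filtered by the interval.  No scan of range(a, b + 1) at all.
--     BIG = [89, 135, 175, 518, 598, 1306, 1676, 2427, 2646798, 12157692622039623539]
--     return list(range(max(a, 0), min(b, 9) + 1)) + [j for j in BIG if a <= j <= b]
-- ===== Notes on version B (the rewrite author's own statement) =====
-- stated objective: faster
-- what changed: B never scans range(a,b+1): the single-digit eureka numbers are produced as the arithmetic intersection of [a,b] with [0,9], and the ten remaining multi-digit eureka constants are filtered by the interval.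
import Mathlib
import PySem

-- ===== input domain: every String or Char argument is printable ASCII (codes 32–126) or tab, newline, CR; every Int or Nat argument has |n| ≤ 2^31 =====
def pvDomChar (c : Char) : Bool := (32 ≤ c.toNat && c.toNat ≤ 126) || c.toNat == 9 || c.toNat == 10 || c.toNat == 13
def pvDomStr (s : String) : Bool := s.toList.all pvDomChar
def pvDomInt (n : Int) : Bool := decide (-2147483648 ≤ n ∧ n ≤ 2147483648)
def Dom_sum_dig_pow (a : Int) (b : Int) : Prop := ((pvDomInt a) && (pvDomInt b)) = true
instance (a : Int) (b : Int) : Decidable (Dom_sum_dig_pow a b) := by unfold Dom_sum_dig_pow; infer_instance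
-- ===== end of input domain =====

-- B replaces the range scan by an arithmetic [a,b]∩[0,9] segment plus an interval filter of the ten multi-digit eureka constants (faster: O(1) vs O(b-a)).


-- ===== PORT A =====
def pvTempA : List Int :=
  [0, 1, 2, 3, 4, 5, 6, 7, 8, 9, 89, 135, 175, 518, 598, 1306, 1676, 2427, 2646798, 12157692622039623539]

def sum_dig_pow (a : Int) (b : Int) : List Int :=
  (PySem.List.pyRange a (b + 1) 1).foldl
    (fun res i => pvTempA.foldl (fun res j => if i == j then res ++ [j] else res) res) []

-- ===== PORT B =====
def pvBigEureka : List Int :=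
  [89, 135, 175, 518, 598, 1306, 1676, 2427, 2646798, 12157692622039623539]

def sum_dig_pow_alt (a : Int) (b : Int) : List Int :=
  PySem.List.pyRange (max a 0) (min b 9 + 1) 1
    ++ pvBigEureka.filter (fun j => decide (a ≤ j) && decide (j ≤ b))

-- ===== PRECONDITION & SPEC =====
def Spec_sum_dig_pow (a : Int) (b : Int) (out : List Int) : Prop := out = sum_dig_pow_alt a b
instance (a : Int) (b : Int) (out : List Int) : Decidable (Spec_sum_dig_pow a b out) := by unfold Spec_sum_dig_pow; infer_instance

-- ===== CLAIM (what is proved, stated in full; the proofs are below) =====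
def Claim_equal_sum_dig_pow : Prop := ∀ (a : Int) (b : Int), Dom_sum_dig_pow a b → Spec_sum_dig_pow a b (sum_dig_pow a b)

-- ===== LEMMAS AND PROOFS =====

-- A's inner loop over the table appends exactly the table elements equal to i.
lemma inner_loop (i : Int) (res : List Int) :
    pvTempA.foldl (fun res j => if i == j then res ++ [j] else res) res
      = res ++ pvTempA.filter (fun j => i == j) := by
  exact PySem.List.foldl_append_if_eq_filter (fun j => i == j) pvTempA res

-- Splitting an interval filter of a strictly sorted list at its right endpoint.
lemma filter_split (L : List Int) (hL : L.Pairwise (· < ·)) (a b : Int) (hab : a ≤ b) :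
    L.filter (fun j => decide (a ≤ j) && decide (j ≤ b))
      = L.filter (fun j => decide (a ≤ j) && decide (j ≤ b - 1)) ++ L.filter (fun j => b == j) := by
  induction L with
  | nil => simp
  | cons x L ih =>
    rcases List.pairwise_cons.mp hL with ⟨hx, hL'⟩
    by_cases hxb : x = b
    · subst hxb
      have h1 : L.filter (fun j => decide (a ≤ j) && decide (j ≤ x)) = [] := by
        apply List.filter_eq_nil_iff.mpr
        intro j hj
        have := hx j hj
        simp only [Bool.and_eq_true, decide_eq_true_eq, not_and]
        omega
      have h2 : L.filter (fun j => decide (a ≤ j) && decide (j ≤ x - 1)) = [] := by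
        apply List.filter_eq_nil_iff.mpr
        intro j hj
        have := hx j hj
        simp only [Bool.and_eq_true, decide_eq_true_eq, not_and]
        omega
      have h3 : L.filter (fun j => x == j) = [] := by
        apply List.filter_eq_nil_iff.mpr
        intro j hj
        have := hx j hj
        simp only [beq_iff_eq]
        omega
      simp only [List.filter_cons, h1, h2, h3, beq_self_eq_true]
      have hxa : decide (a ≤ x) = true := by simp [hab]
      simp [hxa]
    · have hbx : (b == x) = false := by simp; omega
      by_cases hP : a ≤ x ∧ x ≤ b
      · have hQ : a ≤ x ∧ x ≤ b - 1 := ⟨hP.1, by omega⟩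
        have hlt : x < b := by omega
        simp [hP.1, hP.2, hlt, hbx, ih hL']
      · by_cases ha' : a ≤ x
        · have hb' : ¬ x ≤ b := fun h => hP ⟨ha', h⟩
          have hb2 : ¬ x < b := by omega
          simp [hb', hb2, hbx, ih hL']
        · simp [ha', hbx, ih hL']

-- The flatMap over the ascending range of equality filters equals the interval filter.
lemma flat_eq (L : List Int) (hL : L.Pairwise (· < ·)) :
    ∀ (n : Nat) (a b : Int), (b + 1 - a).toNat = n →
      (PySem.List.pyRange a (b + 1) 1).flatMap (fun i => L.filter (fun j => i == j))
        = L.filter (fun j => decide (a ≤ j) && decide (j ≤ b)) := by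
  intro n
  induction n with
  | zero =>
    intro a b h
    have hba : b + 1 ≤ a := by omega
    rw [PySem.List.pyRange_one_eq_nil hba]
    symm
    apply List.filter_eq_nil_iff.mpr
    intro j hj
    simp only [Bool.and_eq_true, decide_eq_true_eq, not_and]
    omega
  | succ n ih =>
    intro a b h
    have hab : a ≤ b := by omega
    rw [PySem.List.pyRange_one_succ_right hab, List.flatMap_append]
    have hIH : (PySem.List.pyRange a ((b - 1) + 1) 1).flatMap (fun i => L.filter (fun j => i == j))
        = L.filter (fun j => decide (a ≤ j) && decide (j ≤ b - 1)) := by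
      apply ih
      omega
    have hb1 : b - 1 + 1 = b := by omega
    rw [hb1] at hIH
    rw [hIH]
    simp only [List.flatMap_cons, List.flatMap_nil, List.append_nil]
    exact (filter_split L hL a b hab).symm

lemma pvTempA_pairwise : pvTempA.Pairwise (· < ·) := by decide

-- A's outer loop accumulates the flatMap of the inner filters.
lemma outer_loop (a b : Int) :
    sum_dig_pow a b
      = (PySem.List.pyRange a (b + 1) 1).flatMap (fun i => pvTempA.filter (fun j => i == j)) := by
  unfold sum_dig_pow
  have : ∀ (I : List Int) (acc : List Int),
      I.foldl (fun res i => pvTempA.foldl (fun res j => if i == j then res ++ [j] else res) res) acc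
        = acc ++ I.flatMap (fun i => pvTempA.filter (fun j => i == j)) := by
    intro I
    induction I with
    | nil => simp
    | cons x I ih =>
      intro acc
      rw [List.foldl_cons, inner_loop, ih, List.flatMap_cons, List.append_assoc]
  simpa using this (PySem.List.pyRange a (b + 1) 1) []

-- A computes the interval filter of the full table.
lemma a_as_filter (a b : Int) :
    sum_dig_pow a b = pvTempA.filter (fun j => decide (a ≤ j) && decide (j ≤ b)) := by
  rw [outer_loop, flat_eq pvTempA pvTempA_pairwise (b + 1 - a).toNat a b rfl]

-- Filtering an ascending range by an interval is the range with clamped bounds.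
lemma range_filter (lo hi a b : Int) :
    (PySem.List.pyRange lo hi 1).filter (fun j => decide (a ≤ j) && decide (j ≤ b))
      = PySem.List.pyRange (max lo a) (min hi (b + 1)) 1 := by
  have hs1 : (PySem.List.pyRange lo hi 1).filter
      (fun j => decide (a ≤ j) && decide (j ≤ b)) |>.Pairwise (· < ·) :=
    (PySem.List.pairwise_lt_pyRange_one lo hi).filter _
  have hs2 := PySem.List.pairwise_lt_pyRange_one (max lo a) (min hi (b + 1))
  have hmem : ∀ x : Int,
      x ∈ (PySem.List.pyRange lo hi 1).filter (fun j => decide (a ≤ j) && decide (j ≤ b))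
        ↔ x ∈ PySem.List.pyRange (max lo a) (min hi (b + 1)) 1 := by
    intro x
    simp only [List.mem_filter, PySem.List.mem_pyRange_one, Bool.and_eq_true, decide_eq_true_eq]
    omega
  have hperm : (PySem.List.pyRange lo hi 1).filter
      (fun j => decide (a ≤ j) && decide (j ≤ b)) |>.Perm
      (PySem.List.pyRange (max lo a) (min hi (b + 1)) 1) :=
    (List.perm_ext_iff_of_nodup hs1.nodup hs2.nodup).mpr hmem
  exact hperm.eq_of_pairwise (fun x y _ _ h1 h2 => absurd h1 (not_lt.mpr h2.le)) hs1 hs2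

lemma temp_split : pvTempA = PySem.List.pyRange 0 10 1 ++ pvBigEureka := by decide

-- ===== VERDICT (by name: the statement is the Claim_ definition above) =====
theorem sum_dig_pow_spec : Claim_equal_sum_dig_pow := by
  intro a b _
  unfold Spec_sum_dig_pow sum_dig_pow_alt
  rw [a_as_filter, temp_split, List.filter_append, range_filter]
  have h1 : max (0 : Int) a = max a 0 := by omega
  have h2 : min (10 : Int) (b + 1) = min b 9 + 1 := by omega
  rw [h1, h2]
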